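-- pv_equiv track=rewrite | github.com/Ranjankumar666/interview_questions | canSum.py | canSumTable
-- ===== SOURCE A (Python) =====
-- def canSumTable(target, arr):
--     table = [[False for i in range(len(arr))] for j in range(target + 1)]
--
--     for i in range(target + 1):
--         for j in range(len(arr)-1 , -1 , -1):
--             if i == 0:
--                 table[i][j] = True
--             else:
--                 nTarget = i - arr[j]
--
--                 if nTarget >= 0 and table[nTarget][j] is True:
--                     table[i][j] = True
--
--                 elif j + 1 < len(arr) and table[i][j+1] is True:
--                     table[i][j] = True
--                 else:
--                     table[i][j] = False
--
--     return table[target][0]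
-- ===== SOURCE B (Python) =====
-- def canSumTable(target, arr):
--     dp = [False] * (target + 1)
--     dp[0] = True
--     for i in range(1, target + 1):
--         dp[i] = any(i - num >= 0 and dp[i - num] for num in arr)
--     return dp[target]
-- ===== Notes on version B (the rewrite author's own statement) =====
-- stated objective: simpler
-- what changed: Replaced the 2D (sum x arr-index) boolean table with use/skip branches by a 1D bottom-up dp over sums 0..target, marking dp[i] when dp[i-num] holds for some num in arr.
import Mathlib
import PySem

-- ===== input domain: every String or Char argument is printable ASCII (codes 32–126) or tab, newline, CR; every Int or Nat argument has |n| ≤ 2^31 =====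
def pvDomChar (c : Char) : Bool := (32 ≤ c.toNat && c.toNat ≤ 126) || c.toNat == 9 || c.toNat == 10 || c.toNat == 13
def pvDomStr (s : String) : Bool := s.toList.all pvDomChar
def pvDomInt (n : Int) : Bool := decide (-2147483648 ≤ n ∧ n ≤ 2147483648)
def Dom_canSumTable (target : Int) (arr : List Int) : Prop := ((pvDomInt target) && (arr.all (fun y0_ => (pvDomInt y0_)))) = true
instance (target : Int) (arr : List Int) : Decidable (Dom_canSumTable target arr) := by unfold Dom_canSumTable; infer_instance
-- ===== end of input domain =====

-- B replaces A's 2D (sum × arr-index) table with use/skip branches by a 1D bottom-up dp over sums 0..target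
-- (simpler, O(target) space); A = B is proved on Pre_ (exactly the inputs where A returns instead of raising IndexError).

-- ===== PORT A =====
-- Python list indexing/assignment, on Lean Arrays (so the port evaluates like Python's array-backed lists):
-- read xs[i] with a default (negative index from the end, default where Python raises IndexError),
-- write xs[i] = v (no-op where Python raises); on Pre_ every access either is in range or sits under a
-- short-circuited guard, where these are exact (bridge lemmas pvAGet_eq / pvASet_toList below).
def pvAGet {α : Type} (a : Array α) (i : Int) (d : α) : α :=
  if 0 ≤ i then a.getD i.toNat d
  else if 0 ≤ i + (a.size : Int) then a.getD (i + (a.size : Int)).toNat d else d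

def pvASet {α : Type} (a : Array α) (i : Int) (v : α) : Array α :=
  if 0 ≤ i then a.setIfInBounds i.toNat v
  else if 0 ≤ i + (a.size : Int) then a.setIfInBounds (i + (a.size : Int)).toNat v else a

-- table[i][j] = v  (row fetched, entry set, row written back)
def pvSet2 (t : Array (Array Bool)) (i j : Int) (v : Bool) : Array (Array Bool) :=
  pvASet t i (pvASet (pvAGet t i #[]) j v)

-- body of A's inner loop for one (i, j)
def pvStep (arr : List Int) (i : Int) (t : Array (Array Bool)) (j : Int) : Array (Array Bool) :=
  if i == 0 then pvSet2 t i j true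
  else
    let nTarget := i - PySem.List.pyGetD arr j 0
    if decide (0 ≤ nTarget) && pvAGet (pvAGet t nTarget #[]) j false then
      pvSet2 t i j true
    else if decide (j + 1 < (arr.length : Int)) && pvAGet (pvAGet t i #[]) (j + 1) false then
      pvSet2 t i j true
    else
      pvSet2 t i j false

def canSumTable (target : Int) (arr : List Int) : Bool :=
  let table : Array (Array Bool) :=
    ((PySem.List.pyRange 0 (target + 1) 1).map
      (fun _ => ((PySem.List.pyRange 0 (arr.length : Int) 1).map (fun _ => false)).toArray)).toArray
  let table :=
    (PySem.List.pyRange 0 (target + 1) 1).foldl (fun t i =>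
      (PySem.List.pyRange ((arr.length : Int) - 1) (-1) (-1)).foldl (pvStep arr i) t) table
  pvAGet (pvAGet table target #[]) 0 false

-- ===== PORT B =====
def canSumTable_alt (target : Int) (arr : List Int) : Bool :=
  let dp : Array Bool := Array.replicate (target + 1).toNat false
  let dp := pvASet dp 0 true
  let dp :=
    (PySem.List.pyRange 1 (target + 1) 1).foldl (fun dp i =>
      pvASet dp i (arr.any (fun num => decide (0 ≤ i - num) && pvAGet dp (i - num) false))) dp
  pvAGet dp target false

-- ===== PRECONDITION & SPEC =====
-- Pre_ excludes exactly the inputs on which A raises IndexError: negative target (table[target] on an empty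
-- table), empty arr (table[target][0] on an empty row), and positive target with a negative element
-- (table[i - arr[j]] beyond the last row).
def Pre_canSumTable (target : Int) (arr : List Int) : Prop :=
  0 ≤ target ∧ arr ≠ [] ∧ (target = 0 ∨ ∀ x ∈ arr, 0 ≤ x)
instance (target : Int) (arr : List Int) : Decidable (Pre_canSumTable target arr) := by
  unfold Pre_canSumTable; infer_instance

def pvWitness_canSumTable : Int × List Int := (7, [5, 3, 4])

def Spec_canSumTable (target : Int) (arr : List Int) (out : Bool) : Prop := out = canSumTable_alt target arr
instance (target : Int) (arr : List Int) (out : Bool) : Decidable (Spec_canSumTable target arr out) := by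
  unfold Spec_canSumTable; infer_instance

-- ===== CLAIM (what is proved, stated in full; the proofs are below) =====
def Claim_equal_canSumTable : Prop := ∀ (target : Int) (arr : List Int), Dom_canSumTable target arr → Pre_canSumTable target arr → Spec_canSumTable target arr (canSumTable target arr)


-- ===== LEMMAS AND PROOFS =====

-- the mathematical value both programs compute: pvGood arr i = "i is a sum of (repeatable) elements of arr,
-- where only elements ≥ 1 can contribute"
def pvGood (arr : List Int) : Nat → Bool
  | 0 => true
  | (m + 1) => arr.any (fun a => if h : 1 ≤ a ∧ a ≤ (m : Int) + 1 then pvGood arr (m + 1 - a.toNat) else false)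
  termination_by m => m
  decreasing_by omega

-- the value A's finished table holds at row i, column j
def pvR (arr : List Int) (i j : Nat) : Bool :=
  if i = 0 then true
  else if hj : j < arr.length then
    (if h2 : 1 ≤ arr[j] ∧ arr[j] ≤ (i : Int) then pvR arr (i - arr[j].toNat) j else false) || pvR arr i (j + 1)
  else false
  termination_by (i, arr.length - j)
  decreasing_by
  · left; omega
  · right; omega

theorem pvGood_succ (arr : List Int) (m : Nat) :
    pvGood arr (m + 1) = arr.any (fun a => if 1 ≤ a ∧ a ≤ (m : Int) + 1 then pvGood arr (m + 1 - a.toNat) else false) := by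
  rw [pvGood]
  congr 1

-- "i is a sum of a list of elements of S, each ≥ 1" — the common meaning of both programs' answers
def pvReach (S : List Int) (i : Nat) : Prop :=
  ∃ l : List Int, (∀ x ∈ l, x ∈ S ∧ 1 ≤ x) ∧ l.sum = (i : Int)

theorem sum_nonneg_of_one_le (l : List Int) (h : ∀ x ∈ l, 1 ≤ x) : 0 ≤ l.sum :=
  List.sum_nonneg (fun x hx => by have := h x hx; omega)

theorem good_iff_reach (arr : List Int) (i : Nat) : pvGood arr i = true ↔ pvReach arr i := by
  induction i using Nat.strong_induction_on with
  | _ i ih =>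
    match i with
    | 0 => exact ⟨fun _ => ⟨[], by simp, by simp⟩, fun _ => by simp [pvGood]⟩
    | (m + 1) =>
      rw [pvGood_succ, List.any_eq_true]
      constructor
      · rintro ⟨a, ha, hg⟩
        by_cases hb : 1 ≤ a ∧ a ≤ (m : Int) + 1
        · rw [if_pos hb] at hg
          obtain ⟨l, hl, hsum⟩ := (ih (m + 1 - a.toNat) (by omega)).1 hg
          exact ⟨a :: l, by
            intro x hx
            rcases List.mem_cons.1 hx with h | h
            · exact ⟨h ▸ ha, h ▸ hb.1⟩
            · exact hl x h, by simp [hsum]; omega⟩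
        · rw [if_neg hb] at hg; exact absurd hg (by simp)
      · rintro ⟨l, hl, hsum⟩
        match l with
        | [] => exact absurd hsum (by simp; omega)
        | (a :: l') =>
          have ha := hl a (List.mem_cons_self)
          have hl' : ∀ x ∈ l', x ∈ arr ∧ 1 ≤ x := fun x hx => hl x (List.mem_cons_of_mem a hx)
          have hs' : 0 ≤ l'.sum := sum_nonneg_of_one_le l' (fun x hx => (hl' x hx).2)
          have hsum' : a + l'.sum = (m : Int) + 1 := by simpa using hsum
          have hb : 1 ≤ a ∧ a ≤ (m : Int) + 1 := ⟨ha.2, by omega⟩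
          refine ⟨a, ha.1, ?_⟩
          rw [if_pos hb]
          apply (ih (m + 1 - a.toNat) (by omega)).2
          exact ⟨l', hl', by omega⟩

-- pvR never holds at an out-of-range column (for i ≥ 1)
theorem pvR_col_lt (arr : List Int) (i j : Nat) (h : pvR arr i j = true) : i = 0 ∨ j < arr.length := by
  rw [pvR] at h
  by_cases hi : i = 0
  · exact Or.inl hi
  · rw [if_neg hi] at h
    by_cases hj : j < arr.length
    · exact Or.inr hj
    · rw [dif_neg hj] at h; exact absurd h (by simp)

-- moving left along a row can only turn entries true
theorem pvR_mono (arr : List Int) (i j k : Nat) (hjk : j ≤ k) (h : pvR arr i k = true) :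
    pvR arr i j = true := by
  by_cases hi : i = 0
  · rw [pvR, if_pos hi]
  · by_cases hj : j = k
    · exact hj ▸ h
    · have h' : pvR arr i (j + 1) = true := pvR_mono arr i (j + 1) k (by omega) h
      have hjlen : j < arr.length := by
        rcases pvR_col_lt arr i (j + 1) h' with h0 | h0
        · exact absurd h0 hi
        · omega
      rw [pvR, if_neg hi, dif_pos hjlen, h']
      simp
  termination_by k - j
  decreasing_by omega

theorem pvR_imp_reach (arr : List Int) (i j : Nat) (h : pvR arr i j = true) :
    pvReach (arr.drop j) i := by
  rw [pvR] at h
  by_cases hi : i = 0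
  · exact ⟨[], by simp, by simp [hi]⟩
  · rw [if_neg hi] at h
    by_cases hj : j < arr.length
    · rw [dif_pos hj] at h
      rw [Bool.or_eq_true] at h
      rcases h with h1 | h1
      · by_cases hb : 1 ≤ arr[j] ∧ arr[j] ≤ (i : Int)
        · rw [dif_pos hb] at h1
          obtain ⟨l, hl, hsum⟩ := pvR_imp_reach arr (i - arr[j].toNat) j h1
          refine ⟨arr[j] :: l, ?_, by simp [hsum]; omega⟩
          intro x hx
          rcases List.mem_cons.1 hx with h2 | h2
          · exact ⟨h2 ▸ (by rw [List.drop_eq_getElem_cons hj]; exact List.mem_cons_self), h2 ▸ hb.1⟩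
          · exact hl x h2
        · rw [dif_neg hb] at h1; exact absurd h1 (by simp)
      · obtain ⟨l, hl, hsum⟩ := pvR_imp_reach arr i (j + 1) h1
        refine ⟨l, ?_, hsum⟩
        intro x hx
        refine ⟨?_, (hl x hx).2⟩
        have := (hl x hx).1
        rw [List.drop_eq_getElem_cons hj]
        exact List.mem_cons_of_mem _ this
    · rw [dif_neg hj] at h; exact absurd h (by simp)
  termination_by (i, arr.length - j)
  decreasing_by
  · left; omega
  · right; omega

theorem reach_imp_pvR (arr : List Int) (l : List Int) (j : Nat)
    (hall : ∀ x ∈ l, x ∈ arr.drop j ∧ 1 ≤ x) : pvR arr l.sum.toNat j = true := by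
  by_cases hnil : l = []
  · subst hnil; rw [pvR]; simp
  · obtain ⟨b, l0, hle⟩ := List.exists_cons_of_ne_nil hnil
    have hb := hall b (by rw [hle]; exact List.mem_cons_self)
    have hpos : 1 ≤ l.sum := by
      have h2 : 0 ≤ l0.sum :=
        sum_nonneg_of_one_le l0 (fun x hx => (hall x (by rw [hle]; exact List.mem_cons_of_mem b hx)).2)
      have h1 := hb.2
      rw [hle, List.sum_cons]
      omega
    -- the least column index k ≥ j whose entry occurs in l
    have hP : ∃ k, j ≤ k ∧ ∃ hk : k < arr.length, arr[k] ∈ l := by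
      have hbd := hb.1
      rw [List.mem_iff_getElem] at hbd
      obtain ⟨o, ho, he⟩ := hbd
      rw [List.getElem_drop] at he
      have ho' : o < arr.length - j := by simpa using ho
      refine ⟨j + o, by omega, by omega, ?_⟩
      simp only [he]
      rw [hle]; exact List.mem_cons_self
    obtain ⟨hjk, hklt, hmem⟩ := Nat.find_spec hP
    have hy := hall _ hmem
    have hyle : arr[Nat.find hP]'hklt ≤ l.sum :=
      List.single_le_sum (fun x hx => by have := (hall x hx).2; omega) _ hmem
    have hsum_erase : arr[Nat.find hP]'hklt + (l.erase (arr[Nat.find hP]'hklt)).sum = l.sum :=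
      List.sum_erase hmem
    have hall' : ∀ x ∈ l.erase (arr[Nat.find hP]'hklt), x ∈ arr.drop (Nat.find hP) ∧ 1 ≤ x := by
      intro x hx
      have hxl := List.mem_of_mem_erase hx
      refine ⟨?_, (hall x hxl).2⟩
      have hxd := (hall x hxl).1
      rw [List.mem_iff_getElem] at hxd
      obtain ⟨o, ho, he⟩ := hxd
      rw [List.getElem_drop] at he
      have ho' : o < arr.length - j := by simpa using ho
      have hko : Nat.find hP ≤ j + o :=
        Nat.find_min' hP ⟨by omega, by omega, he ▸ hxl⟩
      rw [List.mem_iff_getElem]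
      refine ⟨j + o - Nat.find hP, by simp; omega, ?_⟩
      rw [List.getElem_drop]
      simp only [show Nat.find hP + (j + o - Nat.find hP) = j + o by omega]
      exact he
    have hrec : pvR arr (l.erase (arr[Nat.find hP]'hklt)).sum.toNat (Nat.find hP) = true :=
      reach_imp_pvR arr (l.erase (arr[Nat.find hP]'hklt)) (Nat.find hP) hall'
    have hgoalk : pvR arr l.sum.toNat (Nat.find hP) = true := by
      rw [pvR]
      rw [if_neg (by omega), dif_pos hklt]
      have hb2 : 1 ≤ arr[Nat.find hP]'hklt ∧ arr[Nat.find hP]'hklt ≤ (l.sum.toNat : Int) :=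
        ⟨hy.2, by omega⟩
      rw [dif_pos hb2]
      have hsm : 0 ≤ (l.erase (arr[Nat.find hP]'hklt)).sum :=
        sum_nonneg_of_one_le _ (fun x hx => (hall' x hx).2)
      rw [show l.sum.toNat - (arr[Nat.find hP]'hklt).toNat
            = (l.erase (arr[Nat.find hP]'hklt)).sum.toNat by omega, hrec]
      simp
    exact pvR_mono arr l.sum.toNat j (Nat.find hP) hjk hgoalk
  termination_by l.length
  decreasing_by
    rw [List.length_erase_of_mem hmem]
    have : l ≠ [] := hnil
    have : 0 < l.length := List.length_pos_of_ne_nil this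
    omega

theorem pvR_eq_good (arr : List Int) (i : Nat) : pvR arr i 0 = pvGood arr i := by
  rw [Bool.eq_iff_iff, good_iff_reach]
  constructor
  · intro h
    simpa using pvR_imp_reach arr i 0 h
  · rintro ⟨l, hl, hsum⟩
    have h := reach_imp_pvR arr l 0 (by simpa using hl)
    rwa [hsum, Int.toNat_natCast] at h

-- ==== bridges: Array-backed Python list ops vs the PySem list primitives (nonnegative index) ====

theorem pvAGet_eq {α : Type} (a : Array α) (i : Int) (d : α) (hi : 0 ≤ i) :
    pvAGet a i d = PySem.List.pyGetD a.toList i d := by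
  unfold pvAGet
  rw [if_pos hi]
  by_cases h : i < (a.size : Int)
  · have h1 : i.toNat < a.size := by omega
    rw [PySem.List.pyGetD_eq_getElem _ _ hi (by simpa using h)]
    simp [Array.getD, h1]
  · have h1 : ¬ i.toNat < a.size := by omega
    rw [PySem.List.pyGetD_of_none _ _ _ ((PySem.List.pyGet?_eq_none_iff _ _).2
      (by simp [PySem.Raise.InRange]; omega))]
    simp [Array.getD, h1]

theorem pvASet_toList {α : Type} (a : Array α) (i : Int) (v : α) (hi : 0 ≤ i) :
    (pvASet a i v).toList = PySem.List.pySetD a.toList i v := by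
  unfold pvASet
  rw [if_pos hi, PySem.List.pySetD_of_nonneg _ _ hi, Array.toList_setIfInBounds]

theorem pyGetD_oob {α : Type} (xs : List α) (i : Int) (d : α) (_h1 : 0 ≤ i)
    (h2 : (xs.length : Int) ≤ i) : PySem.List.pyGetD xs i d = d :=
  PySem.List.pyGetD_of_none _ _ _ ((PySem.List.pyGet?_eq_none_iff _ _).2
    (by simp [PySem.Raise.InRange]; omega))

theorem map_range_congr {α : Type} (n : Nat) (f g : Nat → α) (h : ∀ c < n, f c = g c) :
    (List.range n).map f = (List.range n).map g :=
  List.map_congr_left (fun c hc => h c (List.mem_range.mp hc))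

theorem set_map_range {α : Type} (n : Nat) (f : Nat → α) (k : Nat) (v : α) :
    ((List.range n).map f).set k v = (List.range n).map (fun c => if c = k then v else f c) := by
  apply List.ext_getElem (by simp)
  intro i h1 h2
  rw [List.getElem_set]
  simp only [List.getElem_map, List.getElem_range]
  by_cases h3 : i = k
  · subst h3; simp
  · rw [if_neg (by omega), if_neg h3]

theorem getD_map_range' {α : Type} (n : Nat) (f : Nat → α) (k : Nat) (d : α) (hk : k < n) :
    PySem.List.pyGetD ((List.range n).map f) (k : Int) d = f k := by
  rw [PySem.List.pyGetD_natCast]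
  exact PySem.List.getD_map_range f n k d hk

-- ==== B side: the dp array holds pvGood on the prefix processed so far ====

def pvDpL (arr : List Int) (T m : Nat) : List Bool :=
  (List.range (T + 1)).map (fun c => if c ≤ m then pvGood arr c else false)

theorem dpB_cond (arr : List Int) (T m : Nat) (hm : m < T) (dp : Array Bool)
    (h : dp.toList = pvDpL arr T m) :
    (arr.any (fun num => decide (0 ≤ ((m : Int) + 1) - num) && pvAGet dp (((m : Int) + 1) - num) false))
      = pvGood arr (m + 1) := by
  rw [pvGood_succ]
  apply PySem.List.any_congr_mem
  intro num _
  by_cases h0 : 0 ≤ (m : Int) + 1 - num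
  · rw [decide_eq_true h0, Bool.true_and, pvAGet_eq _ _ _ h0, h]
    by_cases hT : (m : Int) + 1 - num ≤ (T : Int)
    · rw [show (m : Int) + 1 - num = ((((m : Int) + 1 - num).toNat : Nat) : Int) by omega]
      unfold pvDpL
      rw [getD_map_range' _ _ _ _ (by omega)]
      by_cases hb : 1 ≤ num ∧ num ≤ (m : Int) + 1
      · rw [if_pos (by omega), if_pos hb]
        congr 1
        omega
      · rw [if_neg (by omega), if_neg hb]
    · rw [pyGetD_oob _ _ _ h0 (by unfold pvDpL; simp; omega)]
      rw [if_neg (by omega)]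
  · rw [decide_eq_false h0, Bool.false_and, if_neg (by omega)]

theorem dpB_step (arr : List Int) (T m : Nat) (hm : m < T) (dp : Array Bool)
    (h : dp.toList = pvDpL arr T m) :
    (pvASet dp ((m : Int) + 1)
      (arr.any (fun num => decide (0 ≤ ((m : Int) + 1) - num) && pvAGet dp (((m : Int) + 1) - num) false))).toList
      = pvDpL arr T (m + 1) := by
  rw [dpB_cond arr T m hm dp h]
  rw [pvASet_toList _ _ _ (by omega), PySem.List.pySetD_of_nonneg _ _ (by omega), h]
  rw [show ((m : Int) + 1).toNat = m + 1 by omega]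
  unfold pvDpL
  rw [set_map_range]
  apply map_range_congr
  intro c _
  by_cases h1 : c = m + 1
  · rw [if_pos h1, if_pos (by omega), h1]
  · rw [if_neg h1]
    by_cases h2 : c ≤ m
    · rw [if_pos h2, if_pos (by omega)]
    · rw [if_neg h2, if_neg (by omega)]

theorem dpB_loop (arr : List Int) (T k m : Nat) (hk : m + k ≤ T) (dp : Array Bool)
    (h : dp.toList = pvDpL arr T m) :
    ((PySem.List.pyRange ((m : Int) + 1) ((m : Int) + 1 + (k : Int)) 1).foldl (fun dp i =>
      pvASet dp i (arr.any (fun num => decide (0 ≤ i - num) && pvAGet dp (i - num) false))) dp).toList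
      = pvDpL arr T (m + k) := by
  induction k generalizing m dp with
  | zero =>
    rw [PySem.List.pyRange_one_eq_nil (by omega)]
    simpa using h
  | succ k ih =>
    rw [PySem.List.pyRange_one_cons (by push_cast; omega)]
    simp only [List.foldl_cons]
    have h1 := dpB_step arr T m (by omega) dp h
    have h2 := ih (m + 1) (by omega) _ h1
    have e2 : (m : Int) + 1 + ((k : Nat) + 1 : Nat) = ((m + 1 : Nat) : Int) + 1 + (k : Int) := by
      push_cast; omega
    have e3 : m + (k + 1) = (m + 1) + k := by omega
    rw [e2, e3]
    exact h2

theorem alt_eq_good (target : Int) (arr : List Int) (ht : 0 ≤ target) :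
    canSumTable_alt target arr = pvGood arr target.toNat := by
  obtain ⟨T, rfl⟩ : ∃ T : Nat, target = (T : Int) := ⟨target.toNat, by omega⟩
  rw [Int.toNat_natCast]
  simp only [canSumTable_alt]
  have hinit : (pvASet (Array.replicate ((T : Int) + 1).toNat false) 0 true).toList = pvDpL arr T 0 := by
    rw [pvASet_toList _ _ _ (by omega), PySem.List.pySetD_of_nonneg _ _ (by omega)]
    rw [Array.toList_replicate, show ((T : Int) + 1).toNat = T + 1 by omega,
        show ((0 : Int)).toNat = 0 by omega]
    have hrep : List.replicate (T + 1) false = (List.range (T + 1)).map (fun _ => false) := by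
      rw [List.map_const', List.length_range]
    rw [hrep, set_map_range]
    unfold pvDpL
    apply map_range_congr
    intro c _
    by_cases h1 : c = 0
    · rw [if_pos h1, if_pos (by omega), h1]
      simp [pvGood]
    · rw [if_neg h1, if_neg (by omega)]
  have hT := dpB_loop arr T T 0 (by omega) _ hinit
  simp only [Nat.cast_zero, zero_add] at hT
  rw [show (1 : Int) + (T : Int) = (T : Int) + 1 by omega] at hT
  rw [pvAGet_eq _ _ _ (by omega), hT]
  unfold pvDpL
  rw [getD_map_range' _ _ _ _ (by omega), if_pos (le_refl T)]


-- ==== A side: the list model of A's table and loop ====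

-- list model of A's table write/step (the Array port commutes with these — see set2_comm / step_comm)
def pvSet2L (t : List (List Bool)) (i j : Int) (v : Bool) : List (List Bool) :=
  PySem.List.pySetD t i (PySem.List.pySetD (PySem.List.pyGetD t i []) j v)

def pvStepL (arr : List Int) (i : Int) (t : List (List Bool)) (j : Int) : List (List Bool) :=
  if i == 0 then pvSet2L t i j true
  else
    let nTarget := i - PySem.List.pyGetD arr j 0
    if decide (0 ≤ nTarget) && PySem.List.pyGetD (PySem.List.pyGetD t nTarget []) j false then
      pvSet2L t i j true
    else if decide (j + 1 < (arr.length : Int)) && PySem.List.pyGetD (PySem.List.pyGetD t i []) (j + 1) false then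
      pvSet2L t i j true
    else
      pvSet2L t i j false


def pvRowL (arr : List Int) (i : Nat) : List Bool :=
  (List.range arr.length).map (fun c => pvR arr i c)

def pvRowP (arr : List Int) (i j : Nat) : List Bool :=
  (List.range arr.length).map (fun c => if j ≤ c then pvR arr i c else false)

def pvTbl (arr : List Int) (T m : Nat) : List (List Bool) :=
  (List.range (T + 1)).map (fun r => if r < m then pvRowL arr r else List.replicate arr.length false)

def pvTblP (arr : List Int) (T m j : Nat) : List (List Bool) :=
  (List.range (T + 1)).map (fun r =>
    if r < m then pvRowL arr r else if r = m then pvRowP arr m j else List.replicate arr.length false)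

theorem tblP_row (arr : List Int) (T m j r : Nat) (hr : r < T + 1) :
    PySem.List.pyGetD (pvTblP arr T m j) (r : Int) [] =
      (if r < m then pvRowL arr r else if r = m then pvRowP arr m j else List.replicate arr.length false) := by
  unfold pvTblP
  exact getD_map_range' (T + 1) _ r [] hr

theorem rowP_entry (arr : List Int) (m j c : Nat) (hc : c < arr.length) :
    PySem.List.pyGetD (pvRowP arr m j) (c : Int) false = (if j ≤ c then pvR arr m c else false) := by
  unfold pvRowP
  exact getD_map_range' arr.length _ c false hc

theorem rowL_entry (arr : List Int) (r c : Nat) (hc : c < arr.length) :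
    PySem.List.pyGetD (pvRowL arr r) (c : Int) false = pvR arr r c := by
  unfold pvRowL
  exact getD_map_range' arr.length _ c false hc

theorem rowP_full (arr : List Int) (m : Nat) : pvRowP arr m arr.length = List.replicate arr.length false := by
  unfold pvRowP
  rw [map_range_congr arr.length _ (fun _ => false) (fun c hc => by rw [if_neg (by omega)])]
  rw [List.map_const']
  simp

theorem rowP_zero (arr : List Int) (m : Nat) : pvRowP arr m 0 = pvRowL arr m := by
  unfold pvRowP pvRowL
  exact map_range_congr _ _ _ (fun c _ => by rw [if_pos (Nat.zero_le c)])

theorem tblP_full (arr : List Int) (T m : Nat) : pvTblP arr T m arr.length = pvTbl arr T m := by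
  unfold pvTblP pvTbl
  apply map_range_congr
  intro r _
  by_cases h1 : r < m
  · rw [if_pos h1, if_pos h1]
  · rw [if_neg h1, if_neg h1]
    by_cases h2 : r = m
    · rw [if_pos h2, rowP_full]
    · rw [if_neg h2]

theorem tblP_zero (arr : List Int) (T m : Nat) : pvTblP arr T m 0 = pvTbl arr T (m + 1) := by
  unfold pvTblP pvTbl
  apply map_range_congr
  intro r _
  by_cases h1 : r < m
  · rw [if_pos h1, if_pos (by omega)]
  · rw [if_neg h1]
    by_cases h2 : r = m
    · rw [if_pos h2, if_pos (by omega), rowP_zero, h2]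
    · rw [if_neg h2, if_neg (by omega)]

-- writing pvR arr m j into slot (m, j) of the partial table completes column j
theorem pvSet2_tblP (arr : List Int) (T m j : Nat) (hm : m ≤ T) (v : Bool)
    (hv : v = pvR arr m j) :
    pvSet2L (pvTblP arr T m (j + 1)) (m : Int) (j : Int) v = pvTblP arr T m j := by
  unfold pvSet2L
  rw [tblP_row arr T m (j + 1) m (by omega), if_neg (by omega), if_pos rfl]
  rw [PySem.List.pySetD_natCast, PySem.List.pySetD_natCast]
  unfold pvRowP
  rw [set_map_range]
  have hrow : (List.range arr.length).map (fun c => if c = j then v else if j + 1 ≤ c then pvR arr m c else false)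
      = (List.range arr.length).map (fun c => if j ≤ c then pvR arr m c else false) := by
    apply map_range_congr
    intro c _
    by_cases h1 : c = j
    · rw [if_pos h1, if_pos (by omega), hv, h1]
    · rw [if_neg h1]
      by_cases h2 : j + 1 ≤ c
      · rw [if_pos h2, if_pos (by omega)]
      · rw [if_neg h2, if_neg (by omega)]
  rw [hrow]
  unfold pvTblP
  rw [set_map_range]
  apply map_range_congr
  intro r _
  by_cases h1 : r = m
  · rw [if_pos h1, if_neg (by omega), if_pos h1]
    rfl
  · rw [if_neg h1]
    by_cases h2 : r < m
    · rw [if_pos h2, if_pos h2]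
    · rw [if_neg h2, if_neg h2, if_neg h1, if_neg h1]

theorem step_lemma (arr : List Int) (T m j : Nat) (hm : m ≤ T) (hj : j < arr.length)
    (hA : m = 0 ∨ ∀ a ∈ arr, 0 ≤ a) :
    pvStepL arr (m : Int) (pvTblP arr T m (j + 1)) (j : Int) = pvTblP arr T m j := by
  by_cases hm0 : m = 0
  · subst hm0
    unfold pvStepL
    rw [if_pos (by simp)]
    exact pvSet2_tblP arr T 0 j (by omega) true (by rw [pvR]; simp)
  · have hA' : ∀ a ∈ arr, 0 ≤ a := hA.resolve_left hm0
    have ha : PySem.List.pyGetD arr (j : Int) 0 = arr[j] := by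
      rw [PySem.List.pyGetD_natCast]
      exact List.getD_eq_getElem arr 0 hj
    have hann : 0 ≤ arr[j] := hA' _ (List.getElem_mem hj)
    unfold pvStepL
    rw [if_neg (by simp [hm0])]
    simp only [ha]
    -- the value of A's first condition is the dite in pvR's equation
    have hcond1 : (decide (0 ≤ (m : Int) - arr[j]) &&
        PySem.List.pyGetD (PySem.List.pyGetD (pvTblP arr T m (j + 1)) ((m : Int) - arr[j]) []) (j : Int) false)
        = (if h2 : 1 ≤ arr[j] ∧ arr[j] ≤ (m : Int) then pvR arr (m - arr[j].toNat) j else false) := by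
      by_cases hb : 1 ≤ arr[j] ∧ arr[j] ≤ (m : Int)
      · rw [dif_pos hb]
        have he : (m : Int) - arr[j] = ((m - arr[j].toNat : Nat) : Int) := by omega
        rw [he, tblP_row arr T m (j + 1) _ (by omega), if_pos (by omega)]
        rw [rowL_entry arr _ j hj]
        simp
      · rw [dif_neg hb]
        by_cases hz : arr[j] = 0
        · rw [hz]
          have he : (m : Int) - 0 = ((m : Nat) : Int) := by omega
          rw [he, tblP_row arr T m (j + 1) m (by omega), if_neg (by omega), if_pos rfl]
          rw [rowP_entry arr m (j + 1) j hj, if_neg (by omega)]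
          simp
        · have hgt : (m : Int) < arr[j] := by omega
          rw [decide_eq_false (by omega)]
          simp
    rw [hcond1]
    -- the value of A's second condition is pvR arr m (j+1)
    have hcond2 : (decide ((j : Int) + 1 < (arr.length : Int)) &&
        PySem.List.pyGetD (PySem.List.pyGetD (pvTblP arr T m (j + 1)) (m : Int) []) ((j : Int) + 1) false)
        = pvR arr m (j + 1) := by
      rw [tblP_row arr T m (j + 1) m (by omega), if_neg (by omega), if_pos rfl]
      by_cases hlt : j + 1 < arr.length
      · rw [decide_eq_true (by omega)]
        rw [show ((j : Int) + 1) = ((j + 1 : Nat) : Int) by push_cast; ring]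
        rw [rowP_entry arr m (j + 1) (j + 1) hlt, if_pos (le_refl _)]
        simp
      · rw [decide_eq_false (by omega)]
        have hR : pvR arr m (j + 1) = false := by
          rcases Bool.eq_false_or_eq_true (pvR arr m (j + 1)) with h | h
          · rcases pvR_col_lt arr m (j + 1) h with h0 | h0
            · exact absurd h0 hm0
            · omega
          · exact h
        rw [hR]
        simp
    rw [hcond2]
    have hRm : pvR arr m j =
        ((if h2 : 1 ≤ arr[j] ∧ arr[j] ≤ (m : Int) then pvR arr (m - arr[j].toNat) j else false) || pvR arr m (j + 1)) := by
      conv_lhs => rw [pvR]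
      rw [if_neg hm0, dif_pos hj]
    by_cases hc1 : (if h2 : 1 ≤ arr[j] ∧ arr[j] ≤ (m : Int) then pvR arr (m - arr[j].toNat) j else false) = true
    · rw [if_pos hc1]
      exact pvSet2_tblP arr T m j hm true (by rw [hRm, hc1]; simp)
    · rw [if_neg hc1]
      rw [Bool.not_eq_true] at hc1
      by_cases hc2 : pvR arr m (j + 1) = true
      · rw [if_pos hc2]
        exact pvSet2_tblP arr T m j hm true (by rw [hRm, hc1, hc2]; simp)
      · rw [Bool.not_eq_true] at hc2
        rw [hc2, if_neg (by simp)]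
        exact pvSet2_tblP arr T m j hm false (by rw [hRm, hc1, hc2]; simp)

theorem inner_lemma (arr : List Int) (T m : Nat) (hm : m ≤ T)
    (hA : m = 0 ∨ ∀ a ∈ arr, 0 ≤ a) (j : Nat) (hj : j ≤ arr.length) :
    (PySem.List.pyRange ((j : Int) - 1) (-1) (-1)).foldl (pvStepL arr (m : Int)) (pvTblP arr T m j) = pvTblP arr T m 0 := by
  induction j with
  | zero =>
    rw [show ((0 : Nat) : Int) - 1 = -1 by omega, PySem.List.pyRange_neg_one_eq_nil (by omega)]
    rfl
  | succ j ih =>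
    rw [show ((j + 1 : Nat) : Int) - 1 = (j : Int) by omega]
    rw [PySem.List.pyRange_neg_one_cons (by omega)]
    simp only [List.foldl_cons]
    rw [step_lemma arr T m j hm (by omega) hA]
    exact ih (by omega)

theorem outer_lemma (arr : List Int) (T : Nat) (hA : T = 0 ∨ ∀ a ∈ arr, 0 ≤ a) (m : Nat) (hm : m ≤ T + 1) :
    (PySem.List.pyRange (m : Int) ((T : Int) + 1) 1).foldl (fun t i =>
      (PySem.List.pyRange ((arr.length : Int) - 1) (-1) (-1)).foldl (pvStepL arr i) t) (pvTbl arr T m) = pvTbl arr T (T + 1) := by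
  by_cases he : m = T + 1
  · rw [he, PySem.List.pyRange_one_eq_nil (by push_cast; omega)]
    simp
  · have hm' : m ≤ T := by omega
    have hA' : m = 0 ∨ ∀ a ∈ arr, 0 ≤ a := by
      rcases hA with h | h
      · left; omega
      · right; exact h
    rw [PySem.List.pyRange_one_cons (by omega)]
    simp only [List.foldl_cons]
    rw [← tblP_full arr T m]
    rw [show ((arr.length : Int) - 1) = ((arr.length : Nat) : Int) - 1 from rfl]
    rw [inner_lemma arr T m hm' hA' arr.length (le_refl _)]
    rw [tblP_zero arr T m]
    rw [show (m : Int) + 1 = ((m + 1 : Nat) : Int) by omega]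
    exact outer_lemma arr T hA (m + 1) (by omega)
  termination_by T + 1 - m
  decreasing_by omega

-- ==== the Array port of A computes the list model ====

def toLL (t : Array (Array Bool)) : List (List Bool) := t.toList.map Array.toList

theorem read2_comm (t : Array (Array Bool)) (k l : Int) (hk : 0 ≤ k) (hl : 0 ≤ l) :
    pvAGet (pvAGet t k #[]) l false = PySem.List.pyGetD (PySem.List.pyGetD (toLL t) k []) l false := by
  rw [pvAGet_eq _ _ _ hl, pvAGet_eq _ _ _ hk]
  congr 1
  unfold toLL
  rw [show ([] : List Bool) = Array.toList #[] from rfl]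
  exact (PySem.List.pyGetD_map Array.toList t.toList k #[]).symm

theorem set2_comm (t : Array (Array Bool)) (i j : Int) (v : Bool) (hi : 0 ≤ i) (hj : 0 ≤ j) :
    toLL (pvSet2 t i j v) = pvSet2L (toLL t) i j v := by
  unfold pvSet2 pvSet2L
  show (pvASet t i _).toList.map Array.toList = _
  rw [pvASet_toList _ _ _ hi, PySem.List.pySetD_of_nonneg _ _ hi, PySem.List.pySetD_of_nonneg _ _ hi,
      List.map_set]
  congr 1
  rw [pvASet_toList _ _ _ hj]
  congr 1
  rw [pvAGet_eq _ _ _ hi]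
  unfold toLL
  rw [show ([] : List Bool) = Array.toList #[] from rfl]
  exact (PySem.List.pyGetD_map Array.toList t.toList i #[]).symm

theorem step_comm (arr : List Int) (i : Int) (t : Array (Array Bool)) (j : Int) (hi : 0 ≤ i) (hj : 0 ≤ j) :
    toLL (pvStep arr i t j) = pvStepL arr i (toLL t) j := by
  unfold pvStep pvStepL
  simp only []
  have hc1 : (pvAGet (pvAGet t (i - PySem.List.pyGetD arr j 0) #[]) j false)
      = if 0 ≤ i - PySem.List.pyGetD arr j 0 then
          PySem.List.pyGetD (PySem.List.pyGetD (toLL t) (i - PySem.List.pyGetD arr j 0) []) j false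
        else pvAGet (pvAGet t (i - PySem.List.pyGetD arr j 0) #[]) j false := by
    by_cases h0 : 0 ≤ i - PySem.List.pyGetD arr j 0
    · rw [if_pos h0, read2_comm t _ j h0 hj]
    · rw [if_neg h0]
  have hc2 : pvAGet (pvAGet t i #[]) (j + 1) false
      = PySem.List.pyGetD (PySem.List.pyGetD (toLL t) i []) (j + 1) false :=
    read2_comm t i (j + 1) hi (by omega)
  by_cases h00 : (i == 0) = true
  · rw [if_pos h00, if_pos h00]
    exact set2_comm t i j true hi hj
  · rw [if_neg h00, if_neg h00]
    by_cases hg : 0 ≤ i - PySem.List.pyGetD arr j 0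
    · rw [hc1, if_pos hg]
      by_cases hcc : (decide (0 ≤ i - PySem.List.pyGetD arr j 0) &&
          PySem.List.pyGetD (PySem.List.pyGetD (toLL t) (i - PySem.List.pyGetD arr j 0) []) j false) = true
      · rw [if_pos hcc, if_pos hcc]
        exact set2_comm t i j true hi hj
      · rw [if_neg hcc, if_neg hcc, hc2]
        by_cases hd : (decide (j + 1 < (arr.length : Int)) &&
            PySem.List.pyGetD (PySem.List.pyGetD (toLL t) i []) (j + 1) false) = true
        · rw [if_pos hd, if_pos hd]
          exact set2_comm t i j true hi hj
        · rw [if_neg hd, if_neg hd]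
          exact set2_comm t i j false hi hj
    · have hz : decide (0 ≤ i - PySem.List.pyGetD arr j 0) = false := decide_eq_false hg
      rw [hz]
      simp only [Bool.false_and, Bool.false_eq_true, if_false, hc2]
      by_cases hd : (decide (j + 1 < (arr.length : Int)) &&
          PySem.List.pyGetD (PySem.List.pyGetD (toLL t) i []) (j + 1) false) = true
      · rw [if_pos hd, if_pos hd]
        exact set2_comm t i j true hi hj
      · rw [if_neg hd, if_neg hd]
        exact set2_comm t i j false hi hj

theorem innerfold_comm (arr : List Int) (i : Int) (hi : 0 ≤ i) (js : List Int)
    (hjs : ∀ j ∈ js, 0 ≤ j) (t : Array (Array Bool)) :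
    toLL (js.foldl (pvStep arr i) t) = js.foldl (pvStepL arr i) (toLL t) := by
  induction js generalizing t with
  | nil => rfl
  | cons j js ih =>
    simp only [List.foldl_cons]
    rw [ih (fun x hx => hjs x (List.mem_cons_of_mem _ hx)) _,
        step_comm arr i t j hi (hjs j List.mem_cons_self)]

theorem outerfold_comm (arr : List Int) (is : List Int) (his : ∀ x ∈ is, 0 ≤ x)
    (t : Array (Array Bool)) :
    toLL (is.foldl (fun t i =>
        (PySem.List.pyRange ((arr.length : Int) - 1) (-1) (-1)).foldl (pvStep arr i) t) t)
      = is.foldl (fun t i =>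
        (PySem.List.pyRange ((arr.length : Int) - 1) (-1) (-1)).foldl (pvStepL arr i) t) (toLL t) := by
  induction is generalizing t with
  | nil => rfl
  | cons i is ih =>
    simp only [List.foldl_cons]
    rw [ih (fun x hx => his x (List.mem_cons_of_mem _ hx)) _,
        innerfold_comm arr i (his i List.mem_cons_self) _ (fun j hj => by
          have := PySem.List.mem_pyRange_neg_one.1 hj
          omega)]

theorem a_eq_good (target : Int) (arr : List Int) (hp : Pre_canSumTable target arr) :
    canSumTable target arr = pvGood arr target.toNat := by
  obtain ⟨ht, hne, hor⟩ := hp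
  have hn : 0 < arr.length := List.length_pos_of_ne_nil hne
  obtain ⟨T, rfl⟩ : ∃ T : Nat, target = (T : Int) := ⟨target.toNat, by omega⟩
  rw [Int.toNat_natCast]
  simp only [canSumTable]
  rw [read2_comm _ (T : Int) 0 (by omega) (by omega)]
  rw [outerfold_comm arr _ (fun x hx => by have := PySem.List.mem_pyRange_one.1 hx; omega) _]
  have htoLL : toLL (((PySem.List.pyRange 0 ((T : Int) + 1) 1).map
      (fun _ => ((PySem.List.pyRange 0 (arr.length : Int) 1).map (fun _ => false)).toArray)).toArray)
      = (PySem.List.pyRange 0 ((T : Int) + 1) 1).map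
        (fun _ => (PySem.List.pyRange 0 (arr.length : Int) 1).map (fun _ => false)) := by
    unfold toLL
    rw [List.toList_toArray, List.map_map]
    apply List.map_congr_left
    intro x _
    simp
  rw [htoLL]
  have hinit : (PySem.List.pyRange 0 ((T : Int) + 1) 1).map
      (fun _ => (PySem.List.pyRange 0 (arr.length : Int) 1).map (fun _ => false)) = pvTbl arr T 0 := by
    rw [List.map_const', List.map_const', PySem.List.length_pyRange_one, PySem.List.length_pyRange_one]
    have e1 : ((T : Int) + 1 - 0).toNat = T + 1 := by omega
    have e2 : ((arr.length : Int) - 0).toNat = arr.length := by omega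
    rw [e1, e2]
    unfold pvTbl
    rw [map_range_congr _ _ (fun _ => List.replicate arr.length false) (fun r _ => by rw [if_neg (by omega)])]
    rw [List.map_const', List.length_range]
  rw [hinit]
  have hA : T = 0 ∨ ∀ a ∈ arr, 0 ≤ a := by
    rcases hor with h | h
    · left; omega
    · right; exact h
  have houter := outer_lemma arr T hA 0 (by omega)
  rw [show (((0 : Nat)) : Int) = (0 : Int) by simp] at houter
  rw [houter]
  have hrow : PySem.List.pyGetD (pvTbl arr T (T + 1)) ((T : Nat) : Int) [] = pvRowL arr T := by
    unfold pvTbl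
    rw [getD_map_range' _ _ _ _ (by omega), if_pos (by omega)]
  rw [hrow]
  rw [show ((0 : Int)) = ((0 : Nat) : Int) from rfl, rowL_entry arr T 0 hn]
  exact pvR_eq_good arr T

-- ===== VERDICT (by name: the statement is the Claim_ definition above) =====
theorem canSumTable_spec : Claim_equal_canSumTable := by
  intro target arr _ hp
  unfold Spec_canSumTable
  rw [a_eq_good target arr hp, alt_eq_good target arr hp.1]
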